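-- pv_equiv track=rewrite | github.com/LohseZSai/nighttrap_eandd2026 | remote_scripts/nighttrap_ops_v1/105_prepare_manual_audit_tasks.py | stratified_order
-- ===== SOURCE A (Python) =====
-- from collections import Counter, defaultdict
--
-- def stratified_order(rows: list[dict[str, str]]) -> list[dict[str, str]]:
--     buckets: dict[tuple[str, str, str], list[dict[str, str]]] = defaultdict(list)
--     for row in rows:
--         key = (row.get("gold_label", ""), row.get("confidence_bucket", ""), row.get("source", ""))
--         buckets[key].append(row)
--     for key in buckets:
--         buckets[key].sort(key=lambda r: (r.get("event_id", ""), r.get("image_path", "")))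
--
--     ordered: list[dict[str, str]] = []
--     keys = sorted(buckets, key=lambda k: (k[0], k[1], k[2]))
--     while keys:
--         next_keys = []
--         for key in keys:
--             if buckets[key]:
--                 ordered.append(buckets[key].pop(0))
--             if buckets[key]:
--                 next_keys.append(key)
--         keys = next_keys
--     return ordered
-- ===== SOURCE B (Python) =====
-- def stratified_order(rows: list[dict[str, str]]) -> list[dict[str, str]]:
--     buckets: dict[tuple[str, str, str], list[dict[str, str]]] = {}
--     for row in rows:
--         key = (row.get("gold_label", ""), row.get("confidence_bucket", ""), row.get("source", ""))
--         buckets.setdefault(key, []).append(row)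
--     tagged = [(pos, key, row)
--               for key, bucket in buckets.items()
--               for pos, row in enumerate(sorted(bucket, key=lambda r: (r.get("event_id", ""), r.get("image_path", ""))))]
--     tagged.sort(key=lambda t: (t[0], t[1]))
--     return [row for _, _, row in tagged]
-- ===== Notes on version B (the rewrite author's own statement) =====
-- stated objective: alternative
-- what changed: Replaces A's round-robin while-loop, which rescans the key list every round and pops from the front of each bucket, by tagging each row with its (within-bucket position, bucket key) and doing a single sort of the tagged rows.
import Mathlib
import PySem

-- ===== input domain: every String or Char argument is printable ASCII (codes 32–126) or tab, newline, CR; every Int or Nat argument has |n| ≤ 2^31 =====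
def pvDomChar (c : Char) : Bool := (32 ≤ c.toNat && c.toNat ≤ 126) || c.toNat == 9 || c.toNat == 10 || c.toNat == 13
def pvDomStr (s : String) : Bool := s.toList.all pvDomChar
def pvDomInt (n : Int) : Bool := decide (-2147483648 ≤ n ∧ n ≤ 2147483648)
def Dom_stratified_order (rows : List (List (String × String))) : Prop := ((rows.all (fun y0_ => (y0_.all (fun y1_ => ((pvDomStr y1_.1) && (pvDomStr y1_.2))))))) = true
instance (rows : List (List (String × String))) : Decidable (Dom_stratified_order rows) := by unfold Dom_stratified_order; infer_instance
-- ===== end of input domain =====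

-- B replaces A's round-robin while-loop (repeated pop(0) + key rescans) by tagging each row
-- with its (within-bucket position, bucket key) and doing one sort — same return value.

-- shared key helpers (the same expressions both Pythons compute inline)
abbrev PvK : Type := String × String × String
abbrev PvR : Type := List (String × String)

-- row.get(k, "") on a dict row
def pvRowGet (r : PvR) (k : String) : String := (PySem.Dict.mk r).getD k ""

def pvKey (r : PvR) : PvK :=
  (pvRowGet r "gold_label", pvRowGet r "confidence_bucket", pvRowGet r "source")

-- Python's tuple key (k[0], k[1], k[2]) ported as a list of code-point lists: lexicographic '<'
-- on List (List Char) is exactly Python's tuple comparison of three strings (exact)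
def pvKeyList (k : PvK) : List (List Char) := [k.1.toList, k.2.1.toList, k.2.2.toList]

-- ===== PORT A =====
-- one round-body step of A's while loop: state = (ordered, buckets, next_keys)
def pvStepA (s : List PvR × PySem.Dict PvK (List PvR) × List PvK) (k : PvK) :
    List PvR × PySem.Dict PvK (List PvR) × List PvK :=
  match s.2.1.getD k [] with
  | [] => s                                  -- both 'if buckets[key]' tests fail
  | h :: t =>                                -- pop(0) = h, bucket becomes t
    (s.1 ++ [h], s.2.1.insert k t, if t.isEmpty then s.2.2 else s.2.2 ++ [k])

-- A's 'while keys:' loop; the fuel only makes the recursion total (rows.length rounds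
-- always suffice: each round shortens every surviving bucket by one)
def pvLoopA (fuel : Nat) (d : PySem.Dict PvK (List PvR)) (ks : List PvK)
    (ordered : List PvR) : List PvR :=
  match fuel with
  | 0 => ordered
  | fuel + 1 =>
    match ks with
    | [] => ordered
    | _ :: _ =>
      let s := ks.foldl pvStepA (ordered, d, ([] : List PvK))
      pvLoopA fuel s.2.1 s.2.2 s.1

def stratified_order (rows : List (List (String × String))) : List (List (String × String)) :=
  -- buckets[key].append(row) on a defaultdict(list)
  let buckets := rows.foldl (fun d row => d.modify (pvKey row) [] (fun b => b ++ [row]))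
    (PySem.Dict.empty : PySem.Dict PvK (List PvR))
  -- for key in buckets: buckets[key].sort(key=...)
  let buckets2 := buckets.keys.foldl (fun d k => d.modify k []
    (fun b => PySem.List.sorted2 b (fun r => (pvRowGet r "event_id").toList) (fun r => (pvRowGet r "image_path").toList))) buckets
  -- keys = sorted(buckets, key=lambda k: (k[0], k[1], k[2]))
  let keys := PySem.List.sorted buckets2.keys pvKeyList
  pvLoopA rows.length buckets2 keys []

-- ===== PORT B =====
def stratified_order_alt (rows : List (List (String × String))) : List (List (String × String)) :=
  -- buckets.setdefault(key, []).append(row)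
  let buckets := rows.foldl (fun d row => d.modify (pvKey row) [] (fun b => b ++ [row]))
    (PySem.Dict.empty : PySem.Dict PvK (List PvR))
  -- tagged = [(pos, key, row) for key, bucket in buckets.items()
  --                           for pos, row in enumerate(sorted(bucket, key=...))]
  let tagged := buckets.items.flatMap (fun p =>
    (PySem.List.enumerate (PySem.List.sorted2 p.2
        (fun r => (pvRowGet r "event_id").toList) (fun r => (pvRowGet r "image_path").toList))).map
      (fun q => (q.1, p.1, q.2)))
  -- tagged.sort(key=lambda t: (t[0], t[1])); the triple t[1] compared via pvKeyList (exact)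
  (PySem.List.sorted2 tagged (fun t => t.1) (fun t => pvKeyList t.2.1)).map (fun t => t.2.2)

-- ===== PRECONDITION & SPEC =====
def Spec_stratified_order (rows : List (List (String × String))) (out : List (List (String × String))) : Prop := out = stratified_order_alt rows
instance (rows : List (List (String × String))) (out : List (List (String × String))) : Decidable (Spec_stratified_order rows out) := by unfold Spec_stratified_order; infer_instance

-- ===== CLAIM (what is proved, stated in full; the proofs are below) =====
def Claim_equal_stratified_order : Prop := ∀ (rows : List (List (String × String))), Dom_stratified_order rows → Spec_stratified_order rows (stratified_order rows)

-- ===== LEMMAS AND PROOFS =====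

-- the sorted buckets, as a function of the key
def pvG (rows : List PvR) (k : PvK) : List PvR :=
  PySem.List.sorted2 (rows.filter (fun r => pvKey r == k))
    (fun r => (pvRowGet r "event_id").toList) (fun r => (pvRowGet r "image_path").toList)

-- round-robin reference: level o emits the heads (tagged (o, key)), then recurse on tails
def pvRRT (fuel : Nat) (o : Int) (ks : List PvK) (g : PvK → List PvR) :
    List (Int × PvK × PvR) :=
  match fuel with
  | 0 => []
  | fuel + 1 =>
    ks.filterMap (fun k => ((g k).head?).map (fun h => (o, k, h)))
      ++ pvRRT fuel (o + 1) (ks.filter (fun k => !((g k).tail.isEmpty))) (fun k => (g k).tail)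

-- the combined Python sort key (t[0], t[1]) as one lexicographic value
def pvOrd (t : Int × PvK × PvR) : Lex (Int × List (List Char)) := toLex (t.1, pvKeyList t.2.1)

theorem pvRRT_congr (fuel : Nat) (o : Int) (ks : List PvK) (g g' : PvK → List PvR)
    (h : ∀ k ∈ ks, g k = g' k) : pvRRT fuel o ks g = pvRRT fuel o ks g' := by
  induction fuel generalizing o ks g g' with
  | zero => rfl
  | succ n ih =>
    simp only [pvRRT]
    rw [List.filterMap_congr (fun k hk => by rw [h k hk]),
        List.filter_congr (fun k hk => by rw [h k hk]),
        ih (o + 1) _ (fun k => (g k).tail) (fun k => (g' k).tail)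
          (fun k hk => congrArg List.tail (h k (List.mem_of_mem_filter hk)))]

theorem pvRound (ks : List PvK) (d : PySem.Dict PvK (List PvR)) (acc : List PvR) (nk : List PvK)
    (hnd : ks.Nodup) (hne : ∀ k ∈ ks, d.getD k [] ≠ []) :
    (ks.foldl pvStepA (acc, d, nk)).1 = acc ++ ks.filterMap (fun k => (d.getD k []).head?) ∧
    (ks.foldl pvStepA (acc, d, nk)).2.2 = nk ++ ks.filter (fun k => !((d.getD k []).tail.isEmpty)) ∧
    (∀ j, (ks.foldl pvStepA (acc, d, nk)).2.1.getD j [] =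
      if j ∈ ks then (d.getD j []).tail else d.getD j []) := by
  induction ks generalizing d acc nk with
  | nil => simp
  | cons k ks ih =>
    obtain ⟨hk, hks⟩ := List.nodup_cons.mp hnd
    obtain ⟨h, t, hb⟩ : ∃ h t, d.getD k [] = h :: t := by
      rcases hd : d.getD k [] with _ | ⟨h, t⟩
      · exact absurd hd (hne k List.mem_cons_self)
      · exact ⟨h, t, rfl⟩
    have hstep : pvStepA (acc, d, nk) k =
        (acc ++ [h], d.insert k t, if t.isEmpty then nk else nk ++ [k]) := by
      simp [pvStepA, hb]
    have hgd : ∀ j ∈ ks, (d.insert k t).getD j [] = d.getD j [] := fun j hj =>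
      PySem.Dict.getD_insert_of_ne d t [] (fun hjk => hk (hjk ▸ hj))
    have hne' : ∀ j ∈ ks, (d.insert k t).getD j [] ≠ [] := fun j hj =>
      (hgd j hj) ▸ hne j (List.mem_cons_of_mem _ hj)
    obtain ⟨ih1, ih2, ih3⟩ := ih (d.insert k t) (acc ++ [h]) (if t.isEmpty then nk else nk ++ [k]) hks hne'
    refine ⟨?_, ?_, ?_⟩
    · rw [List.foldl_cons, hstep, ih1,
        List.filterMap_congr (fun j hj => by rw [hgd j hj])]
      simp [hb]
    · rw [List.foldl_cons, hstep, ih2,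
        List.filter_congr (fun j hj => by rw [hgd j hj])]
      rcases ht : t.isEmpty with _ | _ <;> simp [hb, ht]
    · intro j
      rw [List.foldl_cons, hstep, ih3 j]
      by_cases hjk : j = k
      · subst hjk
        simp [hk, PySem.Dict.getD_insert_self, hb]
      · simp [hjk, PySem.Dict.getD_insert_of_ne d t [] hjk]

theorem pvRRT_nil (fuel : Nat) (o : Int) (g : PvK → List PvR) : pvRRT fuel o [] g = [] := by
  induction fuel generalizing o g <;> simp [pvRRT, *]

theorem pvLoopA_eq_rrt (fuel : Nat) (o : Int) (d : PySem.Dict PvK (List PvR)) (ks : List PvK)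
    (acc : List PvR) (hnd : ks.Nodup) (hne : ∀ k ∈ ks, d.getD k [] ≠ [])
    (hlen : ∀ k ∈ ks, (d.getD k []).length ≤ fuel) :
    pvLoopA fuel d ks acc = acc ++ (pvRRT fuel o ks (fun k => d.getD k [])).map (fun t => t.2.2) := by
  induction fuel generalizing o d ks acc with
  | zero =>
    cases ks with
    | nil => simp [pvLoopA, pvRRT]
    | cons k ks =>
      exact absurd (List.eq_nil_of_length_eq_zero
        (Nat.le_zero.mp (hlen k List.mem_cons_self))) (hne k List.mem_cons_self)
  | succ n ih =>
    cases ks with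
    | nil => simp [pvLoopA, pvRRT, pvRRT_nil]
    | cons k ks' =>
      obtain ⟨h1, h2, h3⟩ := pvRound (k :: ks') d acc [] hnd hne
      set KS := k :: ks' with hKS
      set surv := KS.filter (fun j => !((d.getD j []).tail.isEmpty)) with hsurv
      have hsub : ∀ j ∈ surv, j ∈ KS := fun j hj => List.mem_of_mem_filter hj
      have hgd' : ∀ j ∈ surv, (KS.foldl pvStepA (acc, d, [])).2.1.getD j [] = (d.getD j []).tail :=
        fun j hj => by rw [h3 j, if_pos (hsub j hj)]
      have hrec := ih (o + 1) (KS.foldl pvStepA (acc, d, [])).2.1 surv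
        (acc ++ KS.filterMap (fun j => (d.getD j []).head?))
        (hnd.filter _)
        (fun j hj => by
          rw [hgd' j hj]
          have := List.of_mem_filter hj
          simpa [List.isEmpty_iff] using this)
        (fun j hj => by
          rw [hgd' j hj]
          have hl := hlen j (hsub j hj)
          simp only [List.length_tail]
          omega)
      show pvLoopA n (KS.foldl pvStepA (acc, d, [])).2.1 (KS.foldl pvStepA (acc, d, [])).2.2
          (KS.foldl pvStepA (acc, d, [])).1 = _
      rw [h1, h2, List.nil_append, hrec,
        pvRRT_congr n (o + 1) surv _ (fun j => (d.getD j []).tail) (fun j hj => hgd' j hj)]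
      simp only [pvRRT, List.map_append, List.append_assoc, List.map_filterMap]
      congr 2
      exact List.filterMap_congr (fun j _ => by cases d.getD j [] <;> simp)

theorem pvFlatMap_filter {E : Type} (ks : List PvK) (p : PvK → Bool) (F : PvK → List E)
    (h : ∀ k ∈ ks, p k = false → F k = []) :
    (ks.filter p).flatMap F = ks.flatMap F := by
  induction ks with
  | nil => rfl
  | cons k ks ih =>
    rcases hp : p k with _ | _
    · simp [hp, h k List.mem_cons_self hp,
        ih (fun j hj hpj => h j (List.mem_cons_of_mem _ hj) hpj)]
    · simp [hp, ih (fun j hj hpj => h j (List.mem_cons_of_mem _ hj) hpj)]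

theorem pvFlatMap_append_perm {E : Type} (ks : List PvK) (F G : PvK → List E) :
    (ks.flatMap (fun k => F k ++ G k)).Perm (ks.flatMap F ++ ks.flatMap G) := by
  induction ks with
  | nil => simp
  | cons k ks ih =>
    simp only [List.flatMap_cons, List.append_assoc]
    refine List.Perm.append_left (F k) ?_
    have p1 : (G k ++ ks.flatMap fun j => F j ++ G j).Perm
        (G k ++ (ks.flatMap F ++ ks.flatMap G)) := List.Perm.append_left _ ih
    have p2 := List.perm_append_comm_assoc (G k) (ks.flatMap F) (ks.flatMap G)
    exact p1.trans p2

theorem pvRRT_perm (fuel : Nat) (o : Int) (ks : List PvK) (g : PvK → List PvR)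
    (hne : ∀ k ∈ ks, g k ≠ []) (hlen : ∀ k ∈ ks, (g k).length ≤ fuel) :
    (pvRRT fuel o ks g).Perm
      (ks.flatMap (fun k => (PySem.List.enumerate (g k) o).map (fun q => (q.1, k, q.2)))) := by
  induction fuel generalizing o ks g with
  | zero =>
    cases ks with
    | nil => simp [pvRRT]
    | cons k ks =>
      exact absurd (List.eq_nil_of_length_eq_zero
        (Nat.le_zero.mp (hlen k List.mem_cons_self))) (hne k List.mem_cons_self)
  | succ n ih =>
    simp only [pvRRT]
    have hsplit : (ks.flatMap (fun k => (PySem.List.enumerate (g k) o).map (fun q => (q.1, k, q.2)))).Perm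
        (ks.flatMap (fun k => ((g k).head?.map (fun h => ((o : Int), k, h))).toList ++
          (PySem.List.enumerate (g k).tail (o + 1)).map (fun q => (q.1, k, q.2)))) := by
      refine List.Perm.flatMap (List.Perm.refl ks) (fun k hk => ?_)
      rcases hg : g k with _ | ⟨h, t⟩
      · exact absurd hg (hne k hk)
      · simp [PySem.List.enumerate_cons]
    have h2 := pvFlatMap_append_perm ks
      (fun k => ((g k).head?.map (fun h => ((o : Int), k, h))).toList)
      (fun k => (PySem.List.enumerate (g k).tail (o + 1)).map (fun q => (q.1, k, q.2)))
    have h3 : ks.flatMap (fun k => ((g k).head?.map (fun h => ((o : Int), k, h))).toList) =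
        ks.filterMap (fun k => (g k).head?.map (fun h => (o, k, h))) :=
      (List.filterMap_eq_flatMap_toList _ _).symm
    have h4 : (ks.filter (fun k => !((g k).tail.isEmpty))).flatMap
          (fun k => (PySem.List.enumerate (g k).tail (o + 1)).map (fun q => (q.1, k, q.2))) =
        ks.flatMap (fun k => (PySem.List.enumerate (g k).tail (o + 1)).map (fun q => (q.1, k, q.2))) := by
      refine pvFlatMap_filter ks _ _ (fun k hk hp => ?_)
      have : (g k).tail = [] := by simpa [List.isEmpty_iff] using hp
      simp [this, PySem.List.enumerate_nil]
    have h5 := ih (o + 1) (ks.filter (fun k => !((g k).tail.isEmpty))) (fun k => (g k).tail)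
      (fun k hk => by simpa [List.isEmpty_iff] using List.of_mem_filter hk)
      (fun k hk => by
        have := hlen k (List.mem_of_mem_filter hk)
        simp only [List.length_tail]
        omega)
    refine ((List.Perm.append_left _ (h5.trans (by rw [h4]))).trans ?_).trans hsplit.symm
    rw [h3] at h2
    exact (h2.symm)

theorem pvRRT_mem_fst (fuel : Nat) (o : Int) (ks : List PvK) (g : PvK → List PvR)
    (t : Int × PvK × PvR) (ht : t ∈ pvRRT fuel o ks g) : o ≤ t.1 := by
  induction fuel generalizing o ks g with
  | zero => simp [pvRRT] at ht
  | succ n ih =>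
    simp only [pvRRT, List.mem_append] at ht
    rcases ht with ht | ht
    · obtain ⟨k, _, hk⟩ := List.mem_filterMap.mp ht
      obtain ⟨h, _, rfl⟩ := Option.map_eq_some_iff.mp hk
      exact le_refl o
    · have := ih (o + 1) _ _ ht
      omega

theorem pvRRT_pairwise (fuel : Nat) (o : Int) (ks : List PvK) (g : PvK → List PvR)
    (hks : ks.Pairwise (fun a b => pvKeyList a < pvKeyList b)) :
    (pvRRT fuel o ks g).Pairwise (fun a b => pvOrd a < pvOrd b) := by
  induction fuel generalizing o ks g with
  | zero => simp [pvRRT]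
  | succ n ih =>
    simp only [pvRRT]
    refine List.pairwise_append.mpr ⟨?_, ih (o + 1) _ _ (hks.filter _), ?_⟩
    · refine List.pairwise_filterMap.mpr (hks.imp ?_)
      intro a b hab x hx y hy
      obtain ⟨hx', _, rfl⟩ := Option.map_eq_some_iff.mp hx
      obtain ⟨hy', _, rfl⟩ := Option.map_eq_some_iff.mp hy
      exact Prod.Lex.toLex_lt_toLex.mpr (Or.inr ⟨rfl, hab⟩)
    · intro x hx y hy
      obtain ⟨k, _, hk⟩ := List.mem_filterMap.mp hx
      obtain ⟨h, _, rfl⟩ := Option.map_eq_some_iff.mp hk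
      have hy1 := pvRRT_mem_fst n (o + 1) _ _ y hy
      exact Prod.Lex.toLex_lt_toLex.mpr (Or.inl (by simpa using by omega))

-- sorted2 with an Int major key is sorted by the lexicographic pair key
theorem pvSorted2_eq_sorted_toLex {α : Type} (xs : List α) (k1 : α → Int) (k2 : α → List (List Char)) :
    PySem.List.sorted2 xs k1 k2 = PySem.List.sorted xs (fun x => (toLex (k1 x, k2 x) : Lex (Int × List (List Char)))) := by
  rw [PySem.List.sorted_eq_foldl_insertBy]
  show xs.foldl (fun acc x => PySem.List.insertBy
      (fun a b => decide (k1 a < k1 b) || (!decide (k1 b < k1 a) && decide (k2 a < k2 b))) x acc) [] = _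
  congr 1
  funext acc x
  congr 1
  funext a b
  by_cases h1 : k1 a < k1 b <;> by_cases h2 : k1 b < k1 a <;> by_cases h3 : k2 a < k2 b <;>
    simp [Prod.Lex.toLex_lt_toLex, h1, h2, h3] <;> omega

theorem pvGetD_foldl_modify_sort (l : List PvK) (d : PySem.Dict PvK (List PvR))
    (f : List PvR → List PvR) (k : PvK) (hl : l.Nodup) :
    (l.foldl (fun d k => d.modify k [] (fun b => f b)) d).getD k [] =
      if k ∈ l then f (d.getD k []) else d.getD k [] := by
  induction l generalizing d with
  | nil => simp
  | cons k' l ih =>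
    obtain ⟨hk', hl'⟩ := List.nodup_cons.mp hl
    rw [List.foldl_cons, ih _ hl']
    by_cases hkk : k = k'
    · subst hkk
      simp [hk', PySem.Dict.getD_modify_self]
    · by_cases hkl : k ∈ l <;>
        simp [hkl, hkk, PySem.Dict.getD_modify_of_ne]

theorem pvSet_update_self (s : PySem.Set PvK) (l : List PvK) (h : ∀ x ∈ l, x ∈ s) :
    PySem.Set.update s l = s := by
  induction l generalizing s with
  | nil => rfl
  | cons x l ih =>
    have hx : PySem.Set.add s x = s := by
      simp [PySem.Set.add, PySem.Set.contains, h x List.mem_cons_self]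
    show PySem.Set.update (PySem.Set.add s x) l = s
    rw [hx]
    exact ih s (fun y hy => h y (List.mem_cons_of_mem _ hy))

theorem pvSorted_congr_inst {α κ : Type} [LT κ] (i1 i2 : DecidableLT κ) (xs : List α) (key : α → κ) :
    @PySem.List.sorted α κ _ i1 xs key false = @PySem.List.sorted α κ _ i2 xs key false := by
  congr 1

theorem pvKeyList_inj (a b : PvK) (h : pvKeyList a = pvKeyList b) : a = b := by
  simp only [pvKeyList, List.cons.injEq, and_true] at h
  obtain ⟨h1, h2, h3⟩ := h
  exact Prod.ext (String.toList_inj.mp h1) (Prod.ext (String.toList_inj.mp h2) (String.toList_inj.mp h3))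

theorem stratified_order_eq : ∀ rows, stratified_order rows = stratified_order_alt rows := by
  intro rows
  simp only [stratified_order, stratified_order_alt]
  set sortf : List PvR → List PvR := fun b => PySem.List.sorted2 b
    (fun r => (pvRowGet r "event_id").toList) (fun r => (pvRowGet r "image_path").toList) with hsortf
  set B0 := rows.foldl (fun d row => d.modify (pvKey row) [] (fun b => b ++ [row]))
    (PySem.Dict.empty : PySem.Dict PvK (List PvR)) with hB0
  set B2 := B0.keys.foldl (fun d k => d.modify k [] sortf) B0 with hB2
  set g : PvK → List PvR := pvG rows with hg
  -- bucket contents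
  have hB0' : B0 = (rows.map (fun r => (pvKey r, r))).foldl
      (fun d p => PySem.Dict.modify d p.1 [] (fun b => b ++ [p.2])) PySem.Dict.empty := by
    rw [List.foldl_map]
  have f1 : ∀ k, B0.getD k [] = rows.filter (fun r => pvKey r == k) := by
    intro k
    rw [hB0', PySem.Dict.getD_foldl_modify_append, PySem.Dict.getD_empty, List.nil_append,
      List.filter_map, List.map_map]
    simp [Function.comp_def]
  have f2 : B0.keys = PySem.Set.ofList (rows.map pvKey) := by
    rw [hB0, PySem.Dict.keys_foldl_modify_key rows pvKey [] (fun _ row => (fun b => b ++ [row]))]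
    rfl
  have f3 : B0.keys.Nodup := by
    rw [hB0]
    exact PySem.Dict.nodup_keys_foldl_modify_key rows pvKey [] _ _ PySem.Dict.nodup_keys_empty
  have f4 : ∀ k ∈ B0.keys, B2.getD k [] = g k := by
    intro k hk
    rw [hB2, pvGetD_foldl_modify_sort B0.keys B0 _ k f3, if_pos hk, f1 k]
    rfl
  have f5 : B2.keys = B0.keys := by
    rw [hB2, PySem.Dict.keys_foldl_modify B0.keys [] (fun _ _ => sortf) B0,
      pvSet_update_self B0.keys B0.keys (fun x hx => hx)]
  set ks := PySem.List.sorted B2.keys pvKeyList with hks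
  have f6 : ks.Perm B0.keys := by
    rw [hks, f5]
    exact PySem.List.sorted_perm B0.keys pvKeyList false
  have f7 : ks.Nodup := f6.nodup_iff.mpr f3
  have f8 : ks.Pairwise (fun a b => pvKeyList a < pvKeyList b) := by
    have hle : ks.Pairwise (fun a b => pvKeyList a ≤ pvKeyList b) := by
      rw [hks]
      exact pvSorted_congr_inst _ _ B2.keys pvKeyList ▸ PySem.List.sorted_pairwise B2.keys pvKeyList
    have hne : ks.Pairwise (fun a b => a ≠ b) := f7
    refine (hle.and hne).imp ?_
    rintro a b ⟨h1, h2⟩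
    exact lt_of_le_of_ne h1 (fun heq => h2 (pvKeyList_inj a b heq))
  have f9 : ∀ k ∈ ks, ∃ r ∈ rows, pvKey r = k := by
    intro k hk
    have : k ∈ B0.keys := (f6.mem_iff).mp hk
    rw [f2] at this
    exact List.mem_map.mp ((PySem.Set.mem_ofList _ _).mp this)
  have f10 : ∀ k ∈ ks, g k ≠ [] := by
    intro k hk hgk
    obtain ⟨r, hr, hkr⟩ := f9 k hk
    have hmem : r ∈ rows.filter (fun r => pvKey r == k) :=
      List.mem_filter.mpr ⟨hr, by simp [hkr]⟩
    have hperm := PySem.List.sorted2_perm (rows.filter (fun r => pvKey r == k))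
      (fun r => (pvRowGet r "event_id").toList) (fun r => (pvRowGet r "image_path").toList) false
    rw [show PySem.List.sorted2 (rows.filter (fun r => pvKey r == k))
        (fun r => (pvRowGet r "event_id").toList) (fun r => (pvRowGet r "image_path").toList) false = g k from rfl, hgk] at hperm
    rw [hperm.symm.eq_nil] at hmem
    simp at hmem
  have f11 : ∀ k ∈ ks, (g k).length ≤ rows.length := by
    intro k hk
    have hperm := PySem.List.sorted2_perm (rows.filter (fun r => pvKey r == k))
      (fun r => (pvRowGet r "event_id").toList) (fun r => (pvRowGet r "image_path").toList) false
    have : (g k).length = (rows.filter (fun r => pvKey r == k)).length := hperm.length_eq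
    rw [this]
    exact List.length_filter_le _ _
  have hksmem : ∀ k ∈ ks, k ∈ B0.keys := fun k hk => (f6.mem_iff).mp hk
  -- A side: the loop is the tagged round-robin
  have hA : pvLoopA rows.length B2 ks [] =
      (pvRRT rows.length 0 ks g).map (fun t => t.2.2) := by
    rw [pvLoopA_eq_rrt rows.length 0 B2 ks [] f7
        (fun k hk => (f4 k (hksmem k hk)) ▸ f10 k hk)
        (fun k hk => (f4 k (hksmem k hk)) ▸ f11 k hk),
      pvRRT_congr rows.length 0 ks _ g (fun k hk => f4 k (hksmem k hk)), List.nil_append]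
  -- B side: the tagged list
  set eTag : PvK → List (Int × PvK × PvR) :=
    fun k => (PySem.List.enumerate (g k) 0).map (fun q => (q.1, k, q.2)) with heTag
  have hTagged : B0.items.flatMap (fun p =>
      (PySem.List.enumerate (sortf p.2)).map (fun q => (q.1, p.1, q.2))) = B0.keys.flatMap eTag := by
    rw [PySem.Dict.items_eq_map_keys B0 f3 [], List.flatMap_map]
    exact List.flatMap_congr (fun k _ => by rw [show sortf (B0.getD k []) = g k from by rw [f1 k]; rfl])
  have hsort : PySem.List.sorted2 (B0.keys.flatMap eTag) (fun t => t.1) (fun t => pvKeyList t.2.1) =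
      pvRRT rows.length 0 ks g := by
    rw [pvSorted2_eq_sorted_toLex]
    refine PySem.List.sorted_eq_of_perm_of_pairwise_lt _ _ _ ?_ ?_
    · exact (pvRRT_perm rows.length 0 ks g f10 f11).trans
        (List.Perm.flatMap f6 (fun a _ => List.Perm.refl _))
    · exact pvRRT_pairwise rows.length 0 ks g f8
  rw [hA, hTagged, hsort]

-- ===== VERDICT (by name: the statement is the Claim_ definition above) =====
theorem stratified_order_spec : Claim_equal_stratified_order := by
  intro rows _
  exact stratified_order_eq rows
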